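-- pv_equiv track=rewrite | github.com/lifeShadow59/file-explorer-replica | functions/main.py | getFileOrDirName
-- ===== SOURCE A (Python) =====
-- from typing import Tuple
--
-- def getFileOrDirName(line:str) -> Tuple[str,bool]:
--     indexOfInvertedComma:int = 1
--     fileOrDirName = ''
--     for i in range(0,len(line)):
--         if line[i] == '"':
--             if indexOfInvertedComma == 3:
--                 break
--             indexOfInvertedComma = indexOfInvertedComma + 1
--         if indexOfInvertedComma == 2:
--
--             fileOrDirName = fileOrDirName + ('' if line[i] == '"'  else line[i])
--     isDirectoryAvailable:bool = False
--     if (line.find('directory') == -1):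
--         isDirectoryAvailable = False
--     else:
--         isDirectoryAvailable = True
--     return fileOrDirName , isDirectoryAvailable
-- ===== SOURCE B (Python) =====
-- from typing import Tuple
--
-- def getFileOrDirName(line: str) -> Tuple[str, bool]:
--     parts = line.split('"')
--     name = parts[1] if len(parts) > 1 else ''
--     return name, 'directory' in line
-- ===== Notes on version B (the rewrite author's own statement) =====
-- stated objective: simpler
-- what changed: Replaced the character-by-character quote-counting state machine (index counter plus char-wise string concatenation) by one library split on the double-quote character plus taking the second piece, and replaced the find()==-1 branch by a direct substring membership test.
import Mathlib
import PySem

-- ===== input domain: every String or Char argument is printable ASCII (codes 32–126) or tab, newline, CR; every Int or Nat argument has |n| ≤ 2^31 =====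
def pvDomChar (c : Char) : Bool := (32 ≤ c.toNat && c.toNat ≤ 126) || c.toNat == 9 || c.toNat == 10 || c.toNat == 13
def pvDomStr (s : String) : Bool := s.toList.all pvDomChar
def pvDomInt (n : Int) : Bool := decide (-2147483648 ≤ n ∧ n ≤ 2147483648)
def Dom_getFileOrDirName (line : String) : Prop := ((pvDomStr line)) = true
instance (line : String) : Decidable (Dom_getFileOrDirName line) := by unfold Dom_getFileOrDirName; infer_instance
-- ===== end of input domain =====

-- B replaces A's quote-counting character loop by one split on '"' plus indexing; return value only, no side effects.

-- ===== PORT A =====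
-- A's for-loop over the characters of `line`, with the state variables
-- indexOfInvertedComma (starts at 1) and fileOrDirName (accumulated name);
-- `break` is the early return of the accumulator.
def getFileOrDirName_loopA : List Char → Int → List Char → List Char
  | [], _, acc => acc
  | c :: rest, idx, acc =>
    if c = '"' then
      if idx = 3 then acc        -- break
      else
        -- idx+1; the char appended when idx+1 == 2 is '' (nothing)
        getFileOrDirName_loopA rest (idx + 1) acc
    else
      if idx = 2 then getFileOrDirName_loopA rest idx (acc ++ [c])
      else getFileOrDirName_loopA rest idx acc

def getFileOrDirName (line : String) : String × Bool :=
  let name := String.ofList (getFileOrDirName_loopA line.toList 1 [])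
  let isDirectoryAvailable : Bool :=
    if PySem.Str.find line "directory" = -1 then false else true
  (name, isDirectoryAvailable)

-- ===== PORT B =====
def getFileOrDirName_alt (line : String) : String × Bool :=
  let parts : List String := (PySem.Str.split? line "\"").getD []
  let name : String := if 1 < parts.length then parts.getD 1 "" else ""
  (name, PySem.Str.isIn "directory" line)

-- ===== PRECONDITION & SPEC =====
def Spec_getFileOrDirName (line : String) (out : String × Bool) : Prop := out = getFileOrDirName_alt line
instance (line : String) (out : String × Bool) : Decidable (Spec_getFileOrDirName line out) := by unfold Spec_getFileOrDirName; infer_instance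

-- ===== CLAIM (what is proved, stated in full; the proofs are below) =====
def Claim_equal_getFileOrDirName : Prop := ∀ (line : String), Dom_getFileOrDirName line → Spec_getFileOrDirName line (getFileOrDirName line)

-- ===== LEMMAS AND PROOFS =====

-- a structural description of splitting a char list at '"'
def splitQ : List Char → List (List Char)
  | [] => [[]]
  | c :: rest => if c = '"' then [] :: splitQ rest else (splitQ rest).modifyHead (c :: ·)

theorem splitQ_ne_nil (l : List Char) : splitQ l ≠ [] := by
  cases l with
  | nil => simp [splitQ]
  | cons c rest =>
    simp only [splitQ]
    split_ifs
    · simp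
    · cases h : splitQ rest with
      | nil => exact absurd h (splitQ_ne_nil rest)
      | cons a t => simp [List.modifyHead]

theorem splitOn_go_eq (l : List Char) : ∀ (fuel : Nat), l.length ≤ fuel →
    ∀ (cur : List Char) (acc : List (List Char)),
    PySem.Chars.splitOn.go ['"'] fuel l cur acc
      = acc.reverse ++ (splitQ l).modifyHead (cur.reverse ++ ·) := by
  induction l with
  | nil =>
    intro fuel _ cur acc
    cases fuel <;> simp [PySem.Chars.splitOn.go, splitQ, List.modifyHead]
  | cons c rest ih =>
    intro fuel hf cur acc
    cases fuel with
    | zero => simp at hf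
    | succ n =>
      simp only [List.length_cons, Nat.succ_le_succ_iff] at hf
      by_cases hc : c = '"'
      · subst hc
        rw [show PySem.Chars.splitOn.go ['"'] (n+1) ('"' :: rest) cur acc
              = PySem.Chars.splitOn.go ['"'] n rest [] (cur.reverse :: acc) from by
            simp [PySem.Chars.splitOn.go, List.isPrefixOf]]
        rw [ih n hf [] (cur.reverse :: acc)]
        cases h : splitQ rest with
        | nil => exact absurd h (splitQ_ne_nil rest)
        | cons a t => simp [splitQ, List.modifyHead, h]
      · rw [show PySem.Chars.splitOn.go ['"'] (n+1) (c :: rest) cur acc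
              = PySem.Chars.splitOn.go ['"'] n rest (c :: cur) acc from by
            have hnp : (['"'] : List Char).isPrefixOf (c :: rest) = false := by
              simp [List.isPrefixOf]; exact fun h => hc h.symm
            simp [PySem.Chars.splitOn.go, hnp]]
        rw [ih n hf (c :: cur) acc]
        cases h : splitQ rest with
        | nil => exact absurd h (splitQ_ne_nil rest)
        | cons a t => simp [splitQ, hc, List.modifyHead, h]

theorem splitOn_eq_splitQ (l : List Char) :
    PySem.Chars.splitOn l ['"'] = splitQ l := by
  rw [PySem.Chars.splitOn, splitOn_go_eq l (l.length + 1) (by omega) [] []]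
  cases h : splitQ l with
  | nil => exact absurd h (splitQ_ne_nil l)
  | cons a t => simp [List.modifyHead]

-- the A-side loop with state idx = 3 just returns its accumulator
theorem loopA_three (l : List Char) (acc : List Char) :
    getFileOrDirName_loopA l 3 acc = acc := by
  induction l generalizing acc with
  | nil => rfl
  | cons c rest ih =>
    by_cases hc : c = '"' <;> simp [getFileOrDirName_loopA, hc, ih]

-- with state idx = 2 it appends everything up to the next quote
theorem loopA_two (l : List Char) (acc : List Char) :
    getFileOrDirName_loopA l 2 acc = acc ++ (splitQ l).headD [] := by
  induction l generalizing acc with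
  | nil => simp [getFileOrDirName_loopA, splitQ]
  | cons c rest ih =>
    by_cases hc : c = '"'
    · subst hc
      simp [getFileOrDirName_loopA, loopA_three, splitQ, show (2:Int)+1 = 3 from rfl]
    · cases h : splitQ rest with
      | nil => exact absurd h (splitQ_ne_nil rest)
      | cons a t =>
        simp [getFileOrDirName_loopA, hc, ih, splitQ, h, List.modifyHead]

-- from the initial state, the loop computes the second block of splitQ
theorem loopA_one (l : List Char) :
    getFileOrDirName_loopA l 1 [] = (splitQ l).getD 1 [] := by
  induction l with
  | nil => simp [getFileOrDirName_loopA, splitQ]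
  | cons c rest ih =>
    by_cases hc : c = '"'
    · subst hc
      rw [show getFileOrDirName_loopA ('"' :: rest) 1 []
            = getFileOrDirName_loopA rest 2 [] from by
          simp [getFileOrDirName_loopA, show (1:Int)+1 = 2 from rfl]]
      rw [loopA_two]
      cases h : splitQ rest with
      | nil => exact absurd h (splitQ_ne_nil rest)
      | cons a t => simp [splitQ, h]
    · cases h : splitQ rest with
      | nil => exact absurd h (splitQ_ne_nil rest)
      | cons a t =>
        simp [getFileOrDirName_loopA, hc, ih, splitQ, h, List.modifyHead]

-- ===== VERDICT (by name: the statement is the Claim_ definition above) =====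
theorem getFileOrDirName_spec : Claim_equal_getFileOrDirName := by
  intro line _
  unfold Spec_getFileOrDirName getFileOrDirName getFileOrDirName_alt
  -- identify B's parts with splitQ line.toList
  have hsplit := PySem.Str.split?_map line "\""
  rw [show ("\"" : String).toList = ['"'] from rfl] at hsplit
  rw [PySem.Chars.split?] at hsplit
  simp only [List.isEmpty_cons, Bool.false_eq_true, if_false] at hsplit
  rw [splitOn_eq_splitQ] at hsplit
  cases hps : PySem.Str.split? line "\"" with
  | none => rw [hps] at hsplit; simp at hsplit
  | some ps =>
    rw [hps] at hsplit
    simp only [Option.map_some, Option.some.injEq] at hsplit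
    refine Prod.ext ?_ ?_
    · -- names agree
      simp only [Option.getD_some]
      rw [loopA_one, ← hsplit]
      have hlen : (List.map String.toList ps).length = ps.length := by simp
      by_cases h1 : 1 < ps.length
      · have : (List.map String.toList ps).getD 1 [] = (ps.getD 1 "").toList := by
          rcases ps with _ | ⟨a, _ | ⟨b, t⟩⟩ <;> simp at h1 ⊢
        rw [this]
        simp [h1]
      · have : (List.map String.toList ps).getD 1 [] = [] := by
          apply List.getD_eq_default
          omega
        rw [this]
        simp [h1]
    · -- flags agree
      simp only [PySem.Str.isIn, PySem.Chars.isIn, PySem.Str.find_eq]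
      by_cases h : PySem.Chars.find line.toList "directory".toList = -1
      · simp only [show ("directory" : String).toList = ['d','i','r','e','c','t','o','r','y'] from rfl] at h
        simp [h]
      · simp only [show ("directory" : String).toList = ['d','i','r','e','c','t','o','r','y'] from rfl] at h
        simp [h, bne_iff_ne]
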